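-- pv_equiv track=rewrite | github.com/midnightbot/leetcode_solutions | python3_solution_set2/1933. Check if String Is Decomposable Into Value-Equal Substrings.py | isDecomposable
-- ===== SOURCE A (Python) =====
-- def isDecomposable(s: str) -> bool:
--     grps = []
--
--     c = 1
--     for x in range(1,len(s)):
--         if s[x] == s[x-1]:
--             c+=1
--         else:
--             grps.append(c)
--             c = 1
--
--     grps.append(c)
--
--     d = 0
--     markit = []
--     for x in grps:
--         if x%3!=0:
--             d+=1
--             markit.append(x)
--
--     if d!=1:
--         return False
--
--     else:
--         if markit[0]%3 == 2:
--             return True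
--
--         return False
-- ===== SOURCE B (Python) =====
-- def isDecomposable(s: str) -> bool:
--     # Greedy chunk consumption: eat "aaa" triples; allow at most one "aa" pair.
--     n = len(s)
--     i = 0
--     used = False
--     while i < n:
--         if i + 3 <= n and s[i] == s[i+1] == s[i+2]:
--             i += 3
--         elif i + 2 <= n and s[i] == s[i+1]:
--             if used:
--                 return False
--             used = True
--             i += 2
--         else:
--             return False
--     return used
-- ===== Notes on version B (the rewrite author's own statement) =====
-- stated objective: alternative
-- what changed: Replaced A's run-length-encode-then-scan (build the list of run lengths, filter the nonmultiples of 3, inspect count and first remainder) with a greedy chunk consumer that never computes run lengths: it repeatedly eats triples of equal characters and at most one equal pair, returning False as soon as neither fits.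
import Mathlib
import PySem

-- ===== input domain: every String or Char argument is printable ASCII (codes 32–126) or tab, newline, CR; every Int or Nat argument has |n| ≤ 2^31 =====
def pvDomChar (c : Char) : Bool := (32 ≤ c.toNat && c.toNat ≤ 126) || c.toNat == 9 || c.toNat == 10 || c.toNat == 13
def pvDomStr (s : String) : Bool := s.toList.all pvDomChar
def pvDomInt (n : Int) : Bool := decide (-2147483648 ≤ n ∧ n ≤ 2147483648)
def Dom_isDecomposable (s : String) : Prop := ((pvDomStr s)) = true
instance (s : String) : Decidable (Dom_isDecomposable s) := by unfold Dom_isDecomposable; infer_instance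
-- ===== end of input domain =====

-- B replaces A's run-length-encode-then-scan with a greedy consumer of equal-char triples plus at most one equal pair; same asymptotic cost, different algorithm.

-- ===== PORT A =====
-- literal transliteration of A: index loop building grps, then a scan of grps
def isDecomposable (s : String) : Bool :=
  let cs := s.toList
  let st := (PySem.List.pyRange 1 (cs.length : Int) 1).foldl
    (fun (st : List Int × Int) x =>
      if PySem.List.pyGetD cs x ' ' = PySem.List.pyGetD cs (x - 1) ' '
      then (st.1, st.2 + 1)
      else (st.1 ++ [st.2], 1))
    ([], 1)
  let grps := st.1 ++ [st.2]
  let dm := grps.foldl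
    (fun (st : Int × List Int) x =>
      if x % 3 ≠ 0 then (st.1 + 1, st.2 ++ [x]) else st)
    ((0 : Int), ([] : List Int))
  if dm.1 ≠ 1 then false
  else
    -- markit[0]: d = 1 guarantees markit is nonempty, so the none branch is unreachable
    match PySem.List.pyGet? dm.2 0 with
    | some m => if m % 3 = 2 then true else false
    | none => false

-- ===== PORT B =====
-- literal transliteration of B (Source B): the while loop over index i with steps
-- +3/+2 becomes recursion on the remaining character list (the suffix s[i:])
def greedyGo : Bool → List Char → Bool
  | used, a :: b :: c :: t =>
    if a = b ∧ b = c then greedyGo used t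
    else if a = b then (if used then false else greedyGo true (c :: t))
    else false
  | used, [a, b] => if a = b then (if used then false else greedyGo true []) else false
  | _, [_] => false
  | used, [] => used
termination_by _ l => l.length

def isDecomposable_alt (s : String) : Bool := greedyGo false s.toList

-- ===== PRECONDITION & SPEC =====
def Spec_isDecomposable (s : String) (out : Bool) : Prop := out = isDecomposable_alt s
instance (s : String) (out : Bool) : Decidable (Spec_isDecomposable s out) := by unfold Spec_isDecomposable; infer_instance

-- ===== CLAIM (what is proved, stated in full; the proofs are below) =====
def Claim_equal_isDecomposable : Prop := ∀ (s : String), Dom_isDecomposable s → Spec_isDecomposable s (isDecomposable s)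

-- ===== LEMMAS AND PROOFS =====

-- run lengths of p^c ++ xs, structurally
def runsFrom (p : Char) (c : Int) : List Char → List Int
  | [] => [c]
  | x :: xs => if x = p then runsFrom p (c + 1) xs else c :: runsFrom x 1 xs

-- A's first loop, rephrased structurally over the suffix
def foldA (st : List Int × Int) (p : Char) : List Char → List Int × Int
  | [] => st
  | x :: xs => foldA (if x = p then (st.1, st.2 + 1) else (st.1 ++ [st.2], 1)) x xs

theorem foldA_runs (xs : List Char) : ∀ (p : Char) (g : List Int) (c : Int),
    (foldA (g, c) p xs).1 ++ [(foldA (g, c) p xs).2] = g ++ runsFrom p c xs := by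
  induction xs with
  | nil => intro p g c; simp [foldA, runsFrom]
  | cons x xs ih =>
    intro p g c
    by_cases h : x = p
    · subst h
      simp [foldA, runsFrom, ih]
    · simp [foldA, runsFrom, h, ih]

-- the index loop of A equals foldA on the suffix
theorem idx_fold (xs : List Char) : ∀ (pre : List Char) (p : Char) (st : List Int × Int),
    (PySem.List.pyRange ((pre.length : Int) + 1) (((pre ++ p :: xs).length : Int)) 1).foldl
      (fun (st : List Int × Int) x =>
        if PySem.List.pyGetD (pre ++ p :: xs) x ' ' = PySem.List.pyGetD (pre ++ p :: xs) (x - 1) ' '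
        then (st.1, st.2 + 1)
        else (st.1 ++ [st.2], 1)) st
    = foldA st p xs := by
  induction xs with
  | nil =>
    intro pre p st
    rw [PySem.List.pyRange_one_eq_nil (by push_cast [List.length_append, List.length_cons, List.length_nil]; omega)]
    rfl
  | cons y ys ih =>
    intro pre p st
    rw [PySem.List.pyRange_one_cons (by push_cast [List.length_append, List.length_cons, List.length_nil]; omega)]
    rw [List.foldl_cons]
    have h1 : PySem.List.pyGetD (pre ++ p :: y :: ys) ((pre.length : Int) + 1) ' ' = y := by
      have : ((pre.length : Int) + 1) = ((pre.length + 1 : Nat) : Int) := by push_cast; ring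
      rw [this, PySem.List.pyGetD_natCast]
      simp [List.getD]
    have h2 : PySem.List.pyGetD (pre ++ p :: y :: ys) ((pre.length : Int) + 1 - 1) ' ' = p := by
      have : ((pre.length : Int) + 1 - 1) = ((pre.length : Nat) : Int) := by ring
      rw [this, PySem.List.pyGetD_natCast]
      simp [List.getD]
    have key := ih (pre ++ [p]) y
      (if y = p then (st.1, st.2 + 1) else (st.1 ++ [st.2], 1))
    rw [h1, h2]
    show _ = foldA st p (y :: ys)
    rw [foldA]
    simp only [List.append_assoc, List.cons_append, List.nil_append, List.length_append,
      List.length_cons, List.length_nil] at key ⊢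
    push_cast at key ⊢
    ring_nf at key ⊢
    exact key

-- specialization of idx_fold to the whole string (pre = [])
theorem idx_fold0 (c0 : Char) (rest : List Char) (st : List Int × Int) :
    ((PySem.List.pyRange 1 (((c0 :: rest) : List Char).length : Int) 1).foldl
    (fun (st : List Int × Int) x =>
      if PySem.List.pyGetD (c0 :: rest) x ' ' = PySem.List.pyGetD (c0 :: rest) (x - 1) ' '
      then (st.1, st.2 + 1)
      else (st.1 ++ [st.2], 1)) st) = foldA st c0 rest := by
  have hA := idx_fold rest [] c0 st
  simpa using hA

-- A's second loop: count and filter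
theorem foldDM (l : List Int) : ∀ (d : Int) (m : List Int),
    l.foldl (fun (st : Int × List Int) x =>
      if x % 3 ≠ 0 then (st.1 + 1, st.2 ++ [x]) else st) (d, m)
    = (d + (l.filter (fun x => decide (x % 3 ≠ 0))).length, m ++ l.filter (fun x => decide (x % 3 ≠ 0))) := by
  induction l with
  | nil => intro d m; simp
  | cons x xs ih =>
    intro d m
    by_cases h : x % 3 ≠ 0
    · rw [List.foldl_cons, if_pos h, ih, List.filter_cons_of_pos (by simpa using h)]
      refine Prod.ext ?_ ?_
      · push_cast [List.length_cons]; ring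
      · simp
    · rw [List.foldl_cons, if_neg h, List.filter_cons_of_neg (by simpa using h)]
      exact ih d m

-- A's verdict as a function of the bad-run list
def judgeA (bads : List Int) : Bool :=
  if (bads.length : Int) ≠ 1 then false
  else
    match PySem.List.pyGet? bads 0 with
    | some m => if m % 3 = 2 then true else false
    | none => false

theorem A_char (c0 : Char) (rest : List Char) (s : String) (h : s.toList = c0 :: rest) :
    isDecomposable s = judgeA ((runsFrom c0 1 rest).filter (fun x => decide (x % 3 ≠ 0))) := by
  have hG := foldA_runs rest c0 [] 1
  rw [List.nil_append] at hG
  unfold isDecomposable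
  rw [h]
  show (if ((((PySem.List.pyRange 1 (((c0 :: rest) : List Char).length : Int) 1).foldl
    (fun (st : List Int × Int) x =>
      if PySem.List.pyGetD (c0 :: rest) x ' ' = PySem.List.pyGetD (c0 :: rest) (x - 1) ' '
      then (st.1, st.2 + 1)
      else (st.1 ++ [st.2], 1)) ([], 1)).1 ++ [((PySem.List.pyRange 1 (((c0 :: rest) : List Char).length : Int) 1).foldl
    (fun (st : List Int × Int) x =>
      if PySem.List.pyGetD (c0 :: rest) x ' ' = PySem.List.pyGetD (c0 :: rest) (x - 1) ' '
      then (st.1, st.2 + 1)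
      else (st.1 ++ [st.2], 1)) ([], 1)).2]).foldl
    (fun (st : Int × List Int) x =>
      if x % 3 ≠ 0 then (st.1 + 1, st.2 ++ [x]) else st)
    ((0 : Int), ([] : List Int))).1 ≠ 1 then false
  else
    match PySem.List.pyGet? ((((PySem.List.pyRange 1 (((c0 :: rest) : List Char).length : Int) 1).foldl
    (fun (st : List Int × Int) x =>
      if PySem.List.pyGetD (c0 :: rest) x ' ' = PySem.List.pyGetD (c0 :: rest) (x - 1) ' '
      then (st.1, st.2 + 1)
      else (st.1 ++ [st.2], 1)) ([], 1)).1 ++ [((PySem.List.pyRange 1 (((c0 :: rest) : List Char).length : Int) 1).foldl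
    (fun (st : List Int × Int) x =>
      if PySem.List.pyGetD (c0 :: rest) x ' ' = PySem.List.pyGetD (c0 :: rest) (x - 1) ' '
      then (st.1, st.2 + 1)
      else (st.1 ++ [st.2], 1)) ([], 1)).2]).foldl
    (fun (st : Int × List Int) x =>
      if x % 3 ≠ 0 then (st.1 + 1, st.2 ++ [x]) else st)
    ((0 : Int), ([] : List Int))).2 0 with
    | some m => if m % 3 = 2 then true else false
    | none => false) = _
  rw [idx_fold0, hG, foldDM]
  simp only [zero_add, List.nil_append, judgeA]

-- B's verdict as a function of the run-length list
def judgeRuns (used : Bool) : List Int → Bool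
  | [] => used
  | L :: t =>
    if L % 3 = 0 then judgeRuns used t
    else if L % 3 = 2 then (if used then false else judgeRuns true t)
    else false

-- a single maximal block p^n followed by a non-p character (or nothing)
theorem greedy_rep : ∀ (n : ℕ) (p : Char) (t : List Char) (used : Bool),
    (∀ c t', t = c :: t' → c ≠ p) →
    greedyGo used (List.replicate n p ++ t) =
      if n % 3 = 0 then greedyGo used t
      else if n % 3 = 2 then (if used then false else greedyGo true t)
      else false := by
  intro n
  induction n using Nat.strong_induction_on with
  | _ n ih =>
    match n with
    | 0 => intro p t used _; simp
    | 1 =>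
      intro p t used h
      match t with
      | [] => simp [greedyGo]
      | [c] =>
        have hc : p ≠ c := fun e => (h c [] rfl) e.symm
        simp [greedyGo, hc]
      | c :: d :: t' =>
        have hc : p ≠ c := fun e => (h c (d :: t') rfl) e.symm
        simp [greedyGo, hc]
    | 2 =>
      intro p t used h
      match t with
      | [] => cases used <;> simp [greedyGo]
      | c :: t' =>
        have hc : p ≠ c := fun e => (h c t' rfl) e.symm
        simp [greedyGo, hc]
    | (m + 3) =>
      intro p t used h
      have : List.replicate (m + 3) p ++ t = p :: p :: p :: (List.replicate m p ++ t) := by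
        simp [List.replicate_succ]
      rw [this]
      have hmod : (m + 3) % 3 = m % 3 := by omega
      rw [hmod]
      have := ih m (by omega) p t used h
      simpa [greedyGo] using this

-- the greedy consumer computes the run-list verdict
theorem greedy_runs : ∀ (xs : List Char) (n : ℕ) (p : Char) (used : Bool), 1 ≤ n →
    greedyGo used (List.replicate n p ++ xs) = judgeRuns used (runsFrom p (n : Int) xs) := by
  intro xs
  induction xs with
  | nil =>
    intro n p used _
    have h := greedy_rep n p [] used (by intro c t' e; cases e)
    rw [List.append_nil] at h
    rw [List.append_nil, h]
    show _ = judgeRuns used [(n : Int)]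
    have h3 : (n : Int) % 3 = ((n % 3 : ℕ) : Int) := by omega
    by_cases h0 : n % 3 = 0
    · simp [judgeRuns, h0, h3, greedyGo]
    · by_cases h2 : n % 3 = 2
      · have : ¬ ((n : Int) % 3 = 0) := by omega
        have t2 : (n : Int) % 3 = 2 := by omega
        simp [judgeRuns, h2, t2, greedyGo]
      · have z : ¬ ((n : Int) % 3 = 0) := by omega
        have z2 : ¬ ((n : Int) % 3 = 2) := by omega
        simp [judgeRuns, h0, h2, z, z2]
  | cons x xs ih =>
    intro n p used hn
    by_cases hx : x = p
    · subst hx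
      have e1 : List.replicate n x ++ (x :: xs) = List.replicate (n + 1) x ++ xs := by
        simp [List.replicate_succ']
      have e2 : runsFrom x (n : Int) (x :: xs) = runsFrom x ((n : Int) + 1) xs := by
        simp [runsFrom]
      have e3 : ((n : Int) + 1) = ((n + 1 : ℕ) : Int) := by push_cast; ring
      rw [e1, e2, e3]
      exact ih (n + 1) x used (by omega)
    · have e2 : runsFrom p (n : Int) (x :: xs) = (n : Int) :: runsFrom x 1 xs := by
        simp [runsFrom, hx]
      rw [e2]
      have hrep := greedy_rep n p (x :: xs) used (by intro c t' e; cases e; exact hx)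
      have hx1 : (x :: xs) = List.replicate 1 x ++ xs := by simp
      by_cases h0 : n % 3 = 0
      · have z : (n : Int) % 3 = 0 := by omega
        rw [hrep, if_pos h0, hx1, ih 1 x used (by omega)]
        simp [judgeRuns, z]
      · by_cases h2 : n % 3 = 2
        · have z : ¬ ((n : Int) % 3 = 0) := by omega
          have z2 : (n : Int) % 3 = 2 := by omega
          rw [hrep, if_neg h0, if_pos h2]
          cases used with
          | false =>
            rw [hx1, ih 1 x true (by omega)]
            simp [judgeRuns, z, z2]
          | true => simp [judgeRuns, z, z2]
        · have z : ¬ ((n : Int) % 3 = 0) := by omega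
          have z2 : ¬ ((n : Int) % 3 = 2) := by omega
          rw [hrep, if_neg h0, if_neg h2]
          simp [judgeRuns, z, z2]

-- the run-list verdict only depends on the bad runs, in judgeA's form
theorem judgeRuns_filter : ∀ (l : List Int) (used : Bool),
    judgeRuns used l = judgeRuns used (l.filter (fun x => decide (x % 3 ≠ 0))) := by
  intro l
  induction l with
  | nil => intro used; rfl
  | cons L t ih =>
    intro used
    by_cases h0 : L % 3 = 0
    · rw [List.filter_cons_of_neg (by simpa using h0)]
      simp [judgeRuns, h0, ih]
    · rw [List.filter_cons_of_pos (by simpa using h0)]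
      by_cases h2 : L % 3 = 2
      · cases used <;> simp [judgeRuns, h2, ih]
      · simp [judgeRuns, h0, h2]

-- on a list of bad runs (all rem ≠ 0), judgeRuns false is A's verdict
theorem judgeA_eq_judgeRuns (bads : List Int) (h : ∀ b ∈ bads, b % 3 ≠ 0) :
    judgeA bads = judgeRuns false bads := by
  match bads with
  | [] => rfl
  | [b] =>
    have hb : b % 3 ≠ 0 := h b (by simp)
    by_cases h2 : b % 3 = 2
    · simp [judgeA, judgeRuns, h2, PySem.List.pyGet?, PySem.List.pyIdx?]
    · simp [judgeA, judgeRuns, h2, PySem.List.pyGet?, PySem.List.pyIdx?]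
  | b1 :: b2 :: t =>
    have hb1 : b1 % 3 ≠ 0 := h b1 (by simp)
    have hb2 : b2 % 3 ≠ 0 := h b2 (by simp)
    have hl : ((b1 :: b2 :: t).length : Int) ≠ 1 := by
      simp [List.length_cons]; omega
    rw [judgeA, if_pos hl]
    by_cases h2 : b1 % 3 = 2
    · by_cases h2' : b2 % 3 = 2 <;> simp [judgeRuns, hb2, h2, h2']
    · simp [judgeRuns, hb1, h2]

-- ===== VERDICT (by name: the statement is the Claim_ definition above) =====
theorem isDecomposable_spec : Claim_equal_isDecomposable := by
  intro s _
  unfold Spec_isDecomposable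
  cases hcs : s.toList with
  | nil =>
    have hB : isDecomposable_alt s = false := by
      unfold isDecomposable_alt
      rw [hcs]
      simp [greedyGo]
    have hA : isDecomposable s = false := by
      unfold isDecomposable
      rw [hcs]
      have hr : PySem.List.pyRange 1 ((([] : List Char).length : Int)) 1 = [] :=
        PySem.List.pyRange_one_eq_nil (by norm_num)
      norm_num [hr, List.foldl, PySem.List.pyGet?, PySem.List.pyIdx?]
    rw [hA, hB]
  | cons c0 rest =>
    have hB : isDecomposable_alt s
        = judgeRuns false (runsFrom c0 (1 : Int) rest) := by
      unfold isDecomposable_alt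
      rw [hcs]
      have : (c0 :: rest) = List.replicate 1 c0 ++ rest := by simp
      rw [this]
      exact greedy_runs rest 1 c0 false (by omega)
    rw [A_char c0 rest s hcs, hB, judgeRuns_filter,
      judgeA_eq_judgeRuns _ (by
        intro b hb
        have := List.of_mem_filter hb
        simpa using this)]
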